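-- pv_equiv track=rewrite | github.com/nablarch/nabledge-dev | .work/00299/phase22/survey_xlsx.py | _first_dense_row
-- ===== SOURCE A (Python) =====
-- def _non_empty(cell) -> bool:
--     if cell is None:
--         return False
--     if isinstance(cell, str) and not cell.strip():
--         return False
--     return True
--
-- def _first_dense_row(rows: list[list[object]], start: int) -> int:
--     """First row with >=3 consecutive non-empty cells."""
--     for i in range(start, len(rows)):
--         row = rows[i]
--         max_run = cur = 0
--         for c in row:
--             if _non_empty(c):
--                 cur += 1
--                 max_run = max(max_run, cur)
--             else:
--                 cur = 0
--         if max_run >= 3: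
--             return i
--     return -1
-- ===== SOURCE B (Python) =====
-- def _non_empty(cell) -> bool:
--     if cell is None:
--         return False
--     if isinstance(cell, str) and not cell.strip():
--         return False
--     return True
--
-- def _first_dense_row(rows: list[list[object]], start: int) -> int:
--     """First row with >=3 consecutive non-empty cells."""
--     for i in range(start, len(rows)):
--         row = rows[i]
--         if any(_non_empty(a) and _non_empty(b) and _non_empty(c)
--                for a, b, c in zip(row, row[1:], row[2:])):
--             return i
--     return -1
-- ===== Notes on version B (the rewrite author's own statement) =====
-- stated objective: idiomatic
-- what changed: The inner run-length accumulator (max_run/cur updated cell by cell) is replaced by a direct any/all test of the sliding triples zip(row, row[1:], row[2:]); the outer row loop is kept.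
import Mathlib
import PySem

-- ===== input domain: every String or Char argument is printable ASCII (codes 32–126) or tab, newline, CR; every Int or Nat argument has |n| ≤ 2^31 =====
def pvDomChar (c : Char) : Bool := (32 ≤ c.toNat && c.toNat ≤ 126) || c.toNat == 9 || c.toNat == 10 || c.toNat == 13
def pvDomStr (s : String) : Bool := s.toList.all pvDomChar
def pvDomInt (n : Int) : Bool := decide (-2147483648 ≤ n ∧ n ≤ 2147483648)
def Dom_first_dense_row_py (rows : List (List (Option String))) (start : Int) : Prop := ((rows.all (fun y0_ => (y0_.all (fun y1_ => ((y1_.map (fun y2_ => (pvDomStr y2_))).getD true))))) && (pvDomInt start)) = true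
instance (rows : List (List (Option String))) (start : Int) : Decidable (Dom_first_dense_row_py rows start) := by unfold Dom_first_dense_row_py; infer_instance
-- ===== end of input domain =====

-- B replaces A's running max_run/cur counter with an any/all scan of the sliding
-- triples zip(row, row[1:], row[2:]) — more idiomatic, same cost.

-- ===== PORT A =====
-- shared module helper _non_empty (cells are Option String: None or a string)
def pvNonEmpty (c : Option String) : Bool :=
  match c with
  | none => false
  | some s => !(PySem.Str.strip s == "")

-- inner loop of A: fold carrying (max_run, cur)
def pvDenseA (row : List (Option String)) : Int × Int :=
  row.foldl (fun p c => if pvNonEmpty c then (max p.1 (p.2 + 1), p.2 + 1) else (p.1, 0))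
    ((0 : Int), (0 : Int))

-- outer loop of A over the range(start, len(rows)) index list
def pvGoA (rows : List (List (Option String))) : List Int → Int
  | [] => -1
  | i :: rest =>
    match PySem.List.pyGet? rows i with
    | none => -1          -- Python raises IndexError here; excluded by Pre_
    | some row => if 3 ≤ (pvDenseA row).1 then i else pvGoA rows rest

def first_dense_row_py (rows : List (List (Option String))) (start : Int) : Int :=
  pvGoA rows (PySem.List.pyRange start (rows.length : Int) 1)

-- ===== PORT B =====
-- zip(row, row[1:], row[2:]) : the sliding triples
def pvTriples (row : List (Option String)) : List ((Option String × Option String) × Option String) :=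
  (row.zip (PySem.List.slice row (some 1) none)).zip (PySem.List.slice row (some 2) none)

-- any(_non_empty(a) and _non_empty(b) and _non_empty(c) for a, b, c in …)
def pvDenseB (row : List (Option String)) : Bool :=
  (pvTriples row).any (fun t => pvNonEmpty t.1.1 && pvNonEmpty t.1.2 && pvNonEmpty t.2)

def pvGoB (rows : List (List (Option String))) : List Int → Int
  | [] => -1
  | i :: rest =>
    match PySem.List.pyGet? rows i with
    | none => -1          -- Python raises IndexError here; excluded by Pre_
    | some row => if pvDenseB row then i else pvGoB rows rest

def first_dense_row_py_alt (rows : List (List (Option String))) (start : Int) : Int :=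
  pvGoB rows (PySem.List.pyRange start (rows.length : Int) 1)

-- ===== PRECONDITION & SPEC =====
-- Pre_ excludes exactly the inputs where Python A raises IndexError:
-- start < -len(rows) with the loop entered (start < len(rows)) indexes rows out of range.
def Pre_first_dense_row_py (rows : List (List (Option String))) (start : Int) : Prop :=
  -(rows.length : Int) ≤ start ∨ (rows.length : Int) ≤ start
instance (rows : List (List (Option String))) (start : Int) : Decidable (Pre_first_dense_row_py rows start) := by unfold Pre_first_dense_row_py; infer_instance

def pvWitness_first_dense_row_py : List (List (Option String)) × Int :=
  ([[some "a", some "b", some "c"]], 0)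

def Spec_first_dense_row_py (rows : List (List (Option String))) (start : Int) (out : Int) : Prop := out = first_dense_row_py_alt rows start
instance (rows : List (List (Option String))) (start : Int) (out : Int) : Decidable (Spec_first_dense_row_py rows start out) := by unfold Spec_first_dense_row_py; infer_instance

-- ===== CLAIM (what is proved, stated in full; the proofs are below) =====
def Claim_equal_first_dense_row_py : Prop := ∀ (rows : List (List (Option String))) (start : Int), Dom_first_dense_row_py rows start → Pre_first_dense_row_py rows start → Spec_first_dense_row_py rows start (first_dense_row_py rows start)

-- ===== LEMMAS AND PROOFS =====

-- row has at least k leading non-empty cells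
def pvPref : Nat → List (Option String) → Bool
  | 0, _ => true
  | _ + 1, [] => false
  | k + 1, c :: rest => pvNonEmpty c && pvPref k rest

-- row contains 3 consecutive non-empty cells
def pvHas3 : List (Option String) → Bool
  | [] => false
  | c :: rest => (pvNonEmpty c && pvPref 2 rest) || pvHas3 rest

lemma pvPref_two_one (l : List (Option String)) (h : pvPref 2 l = true) : pvPref 1 l = true := by
  cases l with
  | nil => simp [pvPref] at h
  | cons c r => simp [pvPref] at h ⊢; exact h.1

lemma pvPref_three_has3 (l : List (Option String)) (h : pvPref 3 l = true) : pvHas3 l = true := by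
  cases l with
  | nil => simp [pvPref] at h
  | cons c r => simp [pvPref, pvHas3] at h ⊢; exact Or.inl h

lemma foldA_ge3 (l : List (Option String)) : ∀ (m : Int) (cur : Nat), (cur : Int) ≤ m →
    (3 ≤ (l.foldl (fun p c => if pvNonEmpty c then (max p.1 (p.2 + 1), p.2 + 1) else (p.1, 0)) (m, (cur : Int))).1
      ↔ (3 ≤ m ∨ pvPref (3 - cur) l = true ∨ pvHas3 l = true)) := by
  induction l with
  | nil =>
    intro m cur hcm
    by_cases h3 : 3 ≤ cur
    · have : 3 - cur = 0 := by omega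
      simp [this, pvPref, pvHas3]
      omega
    · obtain ⟨k, hk⟩ : ∃ k, 3 - cur = k + 1 := ⟨2 - cur, by omega⟩
      simp [hk, pvPref, pvHas3]
  | cons c rest ih =>
    intro m cur hcm
    rw [List.foldl_cons]
    have hP21 := pvPref_two_one rest
    have hP3H := pvPref_three_has3 rest
    by_cases hc : pvNonEmpty c = true
    · rw [if_pos hc]
      have hstep : ((cur : Int) + 1) = ((cur + 1 : Nat) : Int) := by push_cast; ring
      have ih' := ih (max m ((cur : Int) + 1)) (cur + 1) (by push_cast; exact le_max_right _ _)
      rw [hstep] at ih'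
      dsimp only
      rw [hstep, ih']
      rcases Nat.lt_or_ge cur 3 with hlt | hge
      · interval_cases cur
        · simp [pvPref, pvHas3, hc]
        · simp [pvPref, pvHas3, hc]; tauto
        · simp [pvPref, pvHas3, hc]
      · have h0 : 3 - cur = 0 := by omega
        have h0' : 3 - (cur + 1) = 0 := by omega
        simp [h0, h0', pvPref]
    · rw [if_neg hc]
      have hc' : pvNonEmpty c = false := by simpa using hc
      have ih' := ih m 0 (le_trans (by exact_mod_cast Nat.zero_le cur) hcm)
      rw [Nat.cast_zero] at ih'
      dsimp only
      rw [ih']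
      by_cases h3 : 3 ≤ cur
      · have hm : 3 ≤ m := by omega
        have h0 : 3 - cur = 0 := by omega
        simp [h0, pvPref, pvHas3, hc', hm]
      · obtain ⟨k, hk⟩ : ∃ k, 3 - cur = k + 1 := ⟨2 - cur, by omega⟩
        simp [hk, pvPref, pvHas3, hc']; tauto

lemma pvSliceTwo (xs : List (Option String)) :
    PySem.List.slice xs (some 2) none = xs.drop 2 := by
  rw [show ((2:Int)) = ((2:Nat):Int) by norm_num, PySem.List.slice_from_natCast]

lemma pvSliceOne (xs : List (Option String)) :
    PySem.List.slice xs (some 1) none = xs.drop 1 := by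
  rw [show ((1:Int)) = ((1:Nat):Int) by norm_num, PySem.List.slice_from_natCast]

lemma denseB_eq_has3 : ∀ (row : List (Option String)), pvDenseB row = pvHas3 row
  | [] => by simp [pvDenseB, pvTriples, pvHas3, pvSliceOne, pvSliceTwo]
  | [a] => by simp [pvDenseB, pvTriples, pvHas3, pvPref, pvSliceOne, pvSliceTwo]
  | [a, b] => by simp [pvDenseB, pvTriples, pvHas3, pvPref, pvSliceOne, pvSliceTwo]
  | a :: b :: c :: r => by
    have ih := denseB_eq_has3 (b :: c :: r)
    simp only [pvDenseB, pvTriples, pvSliceOne, pvSliceTwo, List.drop_succ_cons,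
      List.drop_zero, List.zip_cons_cons, List.any_cons] at ih ⊢
    rw [ih]
    simp [pvHas3, pvPref, Bool.and_assoc]

lemma denseA_iff (row : List (Option String)) : (3 ≤ (pvDenseA row).1) ↔ pvDenseB row = true := by
  have h := foldA_ge3 row 0 0 (by norm_num)
  norm_num at h
  unfold pvDenseA
  rw [h, denseB_eq_has3]
  constructor
  · rintro (h | h)
    · exact pvPref_three_has3 _ h
    · exact h
  · intro h; exact Or.inr h

lemma go_eq (rows : List (List (Option String))) : ∀ (idxs : List Int), pvGoA rows idxs = pvGoB rows idxs := by
  intro idxs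
  induction idxs with
  | nil => rfl
  | cons i rest ih =>
    simp only [pvGoA, pvGoB]
    cases PySem.List.pyGet? rows i with
    | none => rfl
    | some row =>
      dsimp only
      rw [ih]
      exact if_congr (denseA_iff row) rfl rfl

-- ===== VERDICT (by name: the statement is the Claim_ definition above) =====
theorem first_dense_row_py_spec : Claim_equal_first_dense_row_py := by
  intro rows start _ _
  show first_dense_row_py rows start = first_dense_row_py_alt rows start
  unfold first_dense_row_py first_dense_row_py_alt
  exact go_eq rows _
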